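-- pv_equiv track=rewrite | github.com/eolandro/IAENERO2026 | Tema3/Rojo/A2/comesolo_solver.py | tablero_a_texto
-- ===== SOURCE A (Python) =====
-- def tablero_a_texto(tablero):
--     simbolos = {0: "_", 1: "o"}
--     idx = 0
--     filas = 5
--     lineas = []
--     for i in range(1, filas + 1):
--         linea = "r%d: " % i
--         for _ in range(i):
--             if idx < len(tablero):
--                 linea += simbolos.get(tablero[idx], " ") + " "
--                 idx += 1
--         lineas.append(linea.rstrip())
--     return "\n".join(lineas)
-- ===== SOURCE B (Python) =====
-- def tablero_a_texto(tablero):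
--     simbolos = {0: "_", 1: "o"}
--     lineas = [
--         ("r%d: " % i
--          + " ".join(simbolos.get(x, " ") for x in tablero[i * (i - 1) // 2 : i * (i - 1) // 2 + i])
--          ).rstrip()
--         for i in range(1, 6)
--     ]
--     return "\n".join(lineas)
-- ===== Notes on version B (the rewrite author's own statement) =====
-- stated objective: alternative
-- what changed: B drops A's stateful running index and per-element bounds check: each row is computed independently from its arithmetic offset i*(i-1)//2 by slicing (Python slices truncate) and joining the symbols with ' '.join, in a single list comprehension.
import Mathlib
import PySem

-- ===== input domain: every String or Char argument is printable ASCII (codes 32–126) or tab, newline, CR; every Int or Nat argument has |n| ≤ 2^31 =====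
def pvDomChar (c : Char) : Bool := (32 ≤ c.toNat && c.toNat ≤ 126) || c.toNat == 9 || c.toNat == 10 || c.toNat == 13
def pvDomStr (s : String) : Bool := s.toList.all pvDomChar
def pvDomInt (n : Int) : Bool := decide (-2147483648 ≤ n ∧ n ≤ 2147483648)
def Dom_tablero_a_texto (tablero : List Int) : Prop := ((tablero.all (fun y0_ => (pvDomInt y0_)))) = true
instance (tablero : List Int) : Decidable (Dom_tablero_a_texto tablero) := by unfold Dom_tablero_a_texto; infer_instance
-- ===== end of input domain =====

-- B replaces A's stateful running index with per-row arithmetic offsets and slices (alternative decomposition, same cost).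

-- ===== PORT A =====
def tablero_a_texto (tablero : List Int) : String :=
  let simbolos : PySem.Dict Int String := PySem.Dict.ofList [(0, "_"), (1, "o")]
  let filas : Int := 5
  let st :=
    (PySem.List.pyRange 1 (filas + 1) 1).foldl
      (fun (st : Nat × List String) i =>
        let inner :=
          (PySem.List.pyRange 0 i 1).foldl
            (fun (st2 : Nat × String) _ =>
              if st2.1 < tablero.length then
                (st2.1 + 1, st2.2 ++ simbolos.getD (PySem.List.pyGetD tablero (st2.1 : Int) 0) " " ++ " ")
              else st2)
            (st.1, "r" ++ PySem.Int.toStr i ++ ": ")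
        (inner.1, st.2 ++ [PySem.Str.rstrip inner.2]))
      (0, ([] : List String))
  PySem.Str.join "\n" st.2

-- ===== PORT B =====
def tablero_a_texto_alt (tablero : List Int) : String :=
  let simbolos : PySem.Dict Int String := PySem.Dict.ofList [(0, "_"), (1, "o")]
  let lineas :=
    (PySem.List.pyRange 1 6 1).map (fun i =>
      let start := PySem.Int.floordiv (i * (i - 1)) 2
      let fila := PySem.List.slice tablero (some start) (some (start + i))
      PySem.Str.rstrip
        ("r" ++ PySem.Int.toStr i ++ ": " ++
          PySem.Str.join " " (fila.map (fun x => simbolos.getD x " "))))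
  PySem.Str.join "\n" lineas

-- ===== PRECONDITION & SPEC =====
def Spec_tablero_a_texto (tablero : List Int) (out : String) : Prop := out = tablero_a_texto_alt tablero
instance (tablero : List Int) (out : String) : Decidable (Spec_tablero_a_texto tablero out) := by unfold Spec_tablero_a_texto; infer_instance

-- ===== CLAIM (what is proved, stated in full; the proofs are below) =====
def Claim_equal_tablero_a_texto : Prop := ∀ (tablero : List Int), Dom_tablero_a_texto tablero → Spec_tablero_a_texto tablero (tablero_a_texto tablero)

-- ===== LEMMAS AND PROOFS =====

-- A's inner loop over range(i): starting at cursor idx ≤ len, it appends the symbols of the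
-- next i elements (truncated at the end of the board) and moves the cursor to min (idx+i) len.
lemma innerA_spec (tab : List Int) (f : Int → String) (n idx : Nat) (pre : String)
    (h : idx ≤ tab.length) :
    (PySem.List.pyRange 0 (n : Int) 1).foldl
      (fun (st2 : Nat × String) _ =>
        if st2.1 < tab.length then
          (st2.1 + 1, st2.2 ++ f (PySem.List.pyGetD tab (st2.1 : Int) 0) ++ " ")
        else st2) (idx, pre)
    = (min (idx + n) tab.length,
       ((tab.drop idx).take n).foldl (fun acc x => acc ++ f x ++ " ") pre) := by
  induction n with
  | zero =>
    simp [PySem.List.pyRange_one_eq_nil, Nat.min_eq_left h]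
  | succ m ih =>
    rw [show ((m + 1 : Nat) : Int) = (m : Int) + 1 by push_cast; ring,
      PySem.List.pyRange_one_succ_right (by positivity), List.foldl_append, ih]
    by_cases hm : idx + m < tab.length
    · have hget : (tab.drop idx)[m]? = some (tab[idx + m]'hm) := by
        rw [List.getElem?_drop]
        exact List.getElem?_eq_getElem hm
      simp only [List.foldl_cons, List.foldl_nil, Nat.min_eq_left (Nat.le_of_lt hm)]
      rw [if_pos hm]
      rw [List.take_add_one, hget]
      simp only [Option.toList_some, List.foldl_append, List.foldl_cons, List.foldl_nil,
        Prod.mk.injEq]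
      refine ⟨by omega, ?_⟩
      congr 1
      rw [PySem.List.pyGetD_eq_getElem tab 0 (by positivity) (by push_cast; omega)]
      congr 1

    · have hL : tab.length ≤ idx + m := Nat.le_of_not_lt hm
      have h1 : min (idx + m) tab.length = tab.length := Nat.min_eq_right hL
      have h2 : min (idx + (m + 1)) tab.length = tab.length := by omega
      rw [h1, h2]
      simp only [List.foldl_cons, List.foldl_nil]
      rw [if_neg (lt_irrefl _)]
      have htk : (tab.drop idx).take m = (tab.drop idx).take (m + 1) := by
        rw [List.take_of_length_le (by simp; omega), List.take_of_length_le (by simp; omega)]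
      rw [htk]

lemma min_chain (a b L : Nat) : min (min a L + b) L = min (a + b) L := by omega

lemma drop_min {α : Type} (xs : List α) (s : Nat) : xs.drop (min s xs.length) = xs.drop s := by
  rcases Nat.le_total s xs.length with h | h
  · rw [Nat.min_eq_left h]
  · rw [Nat.min_eq_right h, List.drop_length, List.drop_eq_nil_of_le h]

lemma rstrip_space (s : List Char) : PySem.Chars.rstrip (s ++ [' ']) = PySem.Chars.rstrip s := by
  simp [PySem.Chars.rstrip, show PySem.Chars.isspace ' ' = true from rfl]

lemma flatten_sp (l : List (List Char)) (h : l ≠ []) :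
    (l.map (· ++ [' '])).flatten = PySem.Chars.join [' '] l ++ [' '] := by
  induction l with
  | nil => simp at h
  | cons a t ih =>
    cases t with
    | nil => simp [PySem.Chars.join_singleton]
    | cons b t' =>
      rw [List.map_cons, List.flatten_cons, ih (by simp), PySem.Chars.join_cons_cons]
      simp [List.append_assoc]

lemma fold_toList (g : Int → String) (chunk : List Int) (pre : String) :
    (chunk.foldl (fun acc x => acc ++ g x ++ " ") pre).toList
    = pre.toList ++ ((chunk.map g).map (fun s => s.toList ++ [' '])).flatten := by
  induction chunk generalizing pre with
  | nil => simp
  | cons c cs ih => simp [ih]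

lemma row_eq (pre : String) (g : Int → String) (chunk : List Int) :
    PySem.Str.rstrip (chunk.foldl (fun acc x => acc ++ g x ++ " ") pre)
    = PySem.Str.rstrip (pre ++ PySem.Str.join " " (chunk.map g)) := by
  rw [← String.toList_inj]
  rw [PySem.Str.toList_rstrip, PySem.Str.toList_rstrip, fold_toList, String.toList_append,
    PySem.Str.toList_join]
  cases chunk with
  | nil => simp
  | cons c cs =>
    have hmm : ((c :: cs).map g).map (fun s => s.toList ++ [' '])
        = (((c :: cs).map g).map String.toList).map (· ++ [' ']) := by
      simp [List.map_map]
    rw [hmm, flatten_sp _ (by simp), ← List.append_assoc, rstrip_space]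
    rfl

lemma innerA_int (tab : List Int) (f : Int → String) (k : Int) (idx : Nat) (pre : String)
    (hk : 0 ≤ k) (h : idx ≤ tab.length) :
    (PySem.List.pyRange 0 k 1).foldl
      (fun (st2 : Nat × String) _ =>
        if st2.1 < tab.length then
          (st2.1 + 1, st2.2 ++ f (tab[st2.1]?.getD 0) ++ " ")
        else st2) (idx, pre)
    = (min (idx + k.toNat) tab.length,
       ((tab.drop idx).take k.toNat).foldl (fun acc x => acc ++ f x ++ " ") pre) := by
  obtain ⟨n, rfl⟩ := Int.eq_ofNat_of_zero_le hk
  have := innerA_spec tab f n idx pre h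
  simpa using this

-- ===== VERDICT (by name: the statement is the Claim_ definition above) =====
theorem tablero_a_texto_spec : Claim_equal_tablero_a_texto := by
  intro tab _
  unfold Spec_tablero_a_texto tablero_a_texto tablero_a_texto_alt
  have hr : PySem.List.pyRange 1 (5 + 1) 1 = [1, 2, 3, 4, 5] := by decide
  have hr2 : PySem.List.pyRange 1 6 1 = [1, 2, 3, 4, 5] := by decide
  simp only [hr, hr2, List.foldl_cons, List.foldl_nil, List.map_cons, List.map_nil,
    PySem.List.pyGetD_natCast, List.getD_eq_getElem?_getD, List.nil_append]
  rw [innerA_int tab (fun x => (PySem.Dict.ofList [((0:Int), "_"), (1, "o")]).getD x " ") 1 0 _ (by norm_num) (Nat.zero_le _)]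
  rw [innerA_int tab (fun x => (PySem.Dict.ofList [((0:Int), "_"), (1, "o")]).getD x " ") 2]
  case hk => norm_num
  case h => exact min_le_right _ _
  rw [innerA_int tab (fun x => (PySem.Dict.ofList [((0:Int), "_"), (1, "o")]).getD x " ") 3]
  case hk => norm_num
  case h => exact min_le_right _ _
  rw [innerA_int tab (fun x => (PySem.Dict.ofList [((0:Int), "_"), (1, "o")]).getD x " ") 4]
  case hk => norm_num
  case h => exact min_le_right _ _
  rw [innerA_int tab (fun x => (PySem.Dict.ofList [((0:Int), "_"), (1, "o")]).getD x " ") 5]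
  case hk => norm_num
  case h => exact min_le_right _ _
  simp only [Int.toNat_one, Nat.zero_add, List.drop_zero, min_chain, drop_min]
  have e1 : PySem.Int.floordiv (1 * (1 - 1)) 2 = 0 := by decide
  have e2 : PySem.Int.floordiv (2 * (2 - 1)) 2 = 1 := by decide
  have e3 : PySem.Int.floordiv (3 * (3 - 1)) 2 = 3 := by decide
  have e4 : PySem.Int.floordiv (4 * (4 - 1)) 2 = 6 := by decide
  have e5 : PySem.Int.floordiv (5 * (5 - 1)) 2 = 10 := by decide
  rw [e1, e2, e3, e4, e5]
  norm_num [PySem.List.slice_toNat, row_eq, show ((2:Int)).toNat = 2 from rfl,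
    show ((3:Int)).toNat = 3 from rfl, show ((4:Int)).toNat = 4 from rfl,
    show ((5:Int)).toNat = 5 from rfl, show ((6:Int)).toNat = 6 from rfl,
    show ((7:Int)).toNat = 7 from rfl, show ((9:Int)).toNat = 9 from rfl,
    show ((10:Int)).toNat = 10 from rfl, show ((11:Int)).toNat = 11 from rfl,
    show ((15:Int)).toNat = 15 from rfl]
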